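-- pv_equiv track=rewrite | github.com/JaphD/Python-Bootcamp | Methods and Functions/Level One.py | old_macdonald
-- ===== SOURCE A (Python) =====
-- def old_macdonald(name):
--     result = []
--
--     for i, letter in enumerate(name):
--         if i == 0 or i == 3:
--             result.append(letter.upper())
--         else:
--             result.append(letter)
--     return ''.join(result)
-- ===== SOURCE B (Python) =====
-- def old_macdonald(name):
--     # Closed-form: concatenate four slices, uppercasing the 1-char slices at
--     # positions 0 and 3; slices clip silently so short strings work unchanged.
--     return name[:1].upper() + name[1:3] + name[3:4].upper() + name[4:]
-- ===== Notes on version B (the rewrite author's own statement) =====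
-- stated objective: simpler
-- what changed: Replaced the enumerate loop with per-index branching and a result list by a single expression concatenating four slices (chars 0 and 3 uppercased, the rest as-is).
import Mathlib
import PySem

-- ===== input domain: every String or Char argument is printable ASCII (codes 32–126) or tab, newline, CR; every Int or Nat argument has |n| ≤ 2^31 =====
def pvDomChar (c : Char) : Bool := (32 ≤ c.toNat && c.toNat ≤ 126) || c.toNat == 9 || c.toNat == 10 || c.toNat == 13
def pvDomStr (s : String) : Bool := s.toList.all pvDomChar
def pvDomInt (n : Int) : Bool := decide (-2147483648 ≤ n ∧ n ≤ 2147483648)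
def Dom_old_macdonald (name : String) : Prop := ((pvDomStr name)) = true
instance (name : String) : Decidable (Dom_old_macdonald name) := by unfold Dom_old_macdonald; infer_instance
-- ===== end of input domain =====

-- B replaces A's per-character loop by a closed form of four slice concatenations (simpler; return value only).


-- ===== PORT A =====
-- literal port of A: enumerate loop appending (uppercased at i=0,3) chars, then join
def old_macdonald (name : String) : String :=
  let result : List Char :=
    (PySem.List.enumerate name.toList).foldl
      (fun acc (p : Int × Char) =>
        if p.1 == 0 || p.1 == 3 then acc ++ [PySem.Chars.upperChar p.2]
        else acc ++ [p.2]) []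
  String.ofList result

-- ===== PORT B =====
-- port of B: name[:1].upper() + name[1:3] + name[3:4].upper() + name[4:]
def old_macdonald_alt (name : String) : String :=
  PySem.Str.upper (PySem.Str.slice name none (some 1)) ++
  PySem.Str.slice name (some 1) (some 3) ++
  PySem.Str.upper (PySem.Str.slice name (some 3) (some 4)) ++
  PySem.Str.slice name (some 4) none

-- ===== PRECONDITION & SPEC =====
def Spec_old_macdonald (name : String) (out : String) : Prop := out = old_macdonald_alt name
instance (name : String) (out : String) : Decidable (Spec_old_macdonald name out) := by unfold Spec_old_macdonald; infer_instance

-- ===== CLAIM (what is proved, stated in full; the proofs are below) =====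
def Claim_equal_old_macdonald : Prop := ∀ (name : String), Dom_old_macdonald name → Spec_old_macdonald name (old_macdonald name)

-- ===== LEMMAS AND PROOFS =====

-- A's loop step
def omStep (acc : List Char) (p : Int × Char) : List Char :=
  if p.1 == 0 || p.1 == 3 then acc ++ [PySem.Chars.upperChar p.2] else acc ++ [p.2]

-- past index 3, A's loop appends every character unchanged
lemma omLoop_tail (l : List Char) : ∀ (acc : List Char) (k : Int), 4 ≤ k →
    (PySem.List.enumerate l k).foldl omStep acc = acc ++ l := by
  induction l with
  | nil => intro acc k _; simp [PySem.List.enumerate_nil]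
  | cons x xs ih =>
    intro acc k hk
    rw [PySem.List.enumerate_cons]
    have h0 : (k == 0) = false := by simp; omega
    have h3 : (k == 3) = false := by simp; omega
    simp only [List.foldl_cons, omStep, h0, h3, Bool.or_false, if_neg Bool.false_ne_true]
    rw [ih (acc ++ [x]) (k + 1) (by omega)]
    simp

-- the list-level equivalence: loop result = four slices
lemma omList (l : List Char) :
    (PySem.List.enumerate l).foldl omStep [] =
    (l.take 1).map PySem.Chars.upperChar ++ ((l.drop 1).take 2) ++
    (((l.drop 3).take 1).map PySem.Chars.upperChar) ++ l.drop 4 := by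
  match l with
  | [] => simp [PySem.List.enumerate_nil]
  | [a] => simp [PySem.List.enumerate, omStep]
  | [a, b] => simp [PySem.List.enumerate, omStep]
  | [a, b, c] => simp [PySem.List.enumerate, omStep]
  | a :: b :: c :: d :: rest =>
    rw [PySem.List.enumerate_cons, PySem.List.enumerate_cons,
        PySem.List.enumerate_cons, PySem.List.enumerate_cons]
    norm_num [omStep]
    rw [omLoop_tail rest _ 4 (by norm_num)]
    simp

-- ===== VERDICT (by name: the statement is the Claim_ definition above) =====
theorem old_macdonald_spec : Claim_equal_old_macdonald := by
  intro name _
  unfold Spec_old_macdonald old_macdonald old_macdonald_alt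
  apply String.toList_injective
  simp only [String.toList_append, PySem.Str.toList_slice, PySem.Str.toList_upper,
    String.toList_ofList]
  rw [show (fun (acc : List Char) (p : Int × Char) =>
      if (p.1 == 0 || p.1 == 3) = true then acc ++ [PySem.Chars.upperChar p.2]
      else acc ++ [p.2]) = omStep from rfl]
  rw [omList name.toList]
  simp [PySem.Chars.upper, PySem.Chars.slice_eq_listSlice,
        PySem.List.slice_to, PySem.List.slice_from,
        PySem.List.slice_toNat]
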